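-- pv_equiv track=rewrite | github.com/PKU-Alignment/align-anything | align_anything/evaluation/mt_bench.py | message_to_prompt
-- ===== SOURCE A (Python) =====
-- from typing import Any, Dict, List
--
-- def message_to_prompt(messages: List[Dict[str, str]]) -> str:
--     prompt = ''
--     last_message = None
--     if len(messages) % 2 == 1:
--         last_message = messages[-1]
--         messages = messages[:-1]
--     for i in range(0, len(messages), 2):
--         user_message = messages[i]
--         assistant_message = messages[i + 1]
--         prompt += f"USER: {user_message.get('content', '')} ASSISTANT:{assistant_message.get('content', '')}\n"
--     if last_message is not None:
--         prompt += f"USER: {last_message.get('content', '')} ASSISTANT:"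
--     return prompt
-- ===== SOURCE B (Python) =====
-- def message_to_prompt(messages):
--     prompt = ''
--     for i, m in enumerate(messages):
--         if i % 2 == 0:
--             prompt += f"USER: {m.get('content', '')} ASSISTANT:"
--         else:
--             prompt += f"{m.get('content', '')}\n"
--     return prompt
-- ===== Notes on version B (the rewrite author's own statement) =====
-- stated objective: simpler
-- what changed: One uniform pass over every message with its index (even index -> 'USER: ... ASSISTANT:', odd index -> content + newline) replaces A's two-per-step pairing loop, the messages[:-1] slice and the separate odd-length last-message special case.
import Mathlib
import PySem

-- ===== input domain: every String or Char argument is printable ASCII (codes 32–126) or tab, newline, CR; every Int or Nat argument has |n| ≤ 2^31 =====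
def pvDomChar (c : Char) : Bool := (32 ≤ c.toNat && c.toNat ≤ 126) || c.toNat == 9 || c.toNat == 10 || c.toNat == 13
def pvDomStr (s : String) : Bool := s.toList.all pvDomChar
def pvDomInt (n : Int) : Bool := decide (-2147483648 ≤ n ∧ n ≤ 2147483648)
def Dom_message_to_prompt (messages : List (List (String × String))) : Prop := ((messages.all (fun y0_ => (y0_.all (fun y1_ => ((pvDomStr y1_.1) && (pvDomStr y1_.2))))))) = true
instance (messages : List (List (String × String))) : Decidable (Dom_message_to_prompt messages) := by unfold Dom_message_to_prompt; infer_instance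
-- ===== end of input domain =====

-- ===== PORT A =====
-- B replaces A's two-per-step pairing loop (plus slice and odd-length special case) by one
-- uniform indexed pass over the messages; objective: simpler.

-- shared helper: m.get('content', '') on an association-list dict (first match)
def contentOf (m : List (String × String)) : String :=
  (((m.find? (fun p => p.1 == "content")).map Prod.snd).getD "")

def message_to_prompt (messages : List (List (String × String))) : String :=
  let lastAndRest : Option (List (String × String)) × List (List (String × String)) :=
    if messages.length % 2 == 1 then
      -- messages[-1] is in range here (the list is nonempty), so pyGetD is exact
      (some (PySem.List.pyGetD messages (-1) []), PySem.List.slice messages none (some (-1)))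
    else (none, messages)
  let ms := lastAndRest.2
  let prompt :=
    (PySem.List.pyRange 0 ms.length 2).foldl
      (fun p i =>
        let userMessage := PySem.List.pyGetD ms i []        -- in range: i < len ms
        let assistantMessage := PySem.List.pyGetD ms (i + 1) []
        p ++ ("USER: " ++ contentOf userMessage ++ " ASSISTANT:" ++ contentOf assistantMessage ++ "\n")) ""
  match lastAndRest.1 with
  | some lm => prompt ++ ("USER: " ++ contentOf lm ++ " ASSISTANT:")
  | none => prompt

-- ===== PORT B =====
def message_to_prompt_alt (messages : List (List (String × String))) : String :=
  (PySem.List.enumerate messages).foldl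
    (fun prompt im =>
      if im.1 % 2 == 0 then prompt ++ ("USER: " ++ contentOf im.2 ++ " ASSISTANT:")
      else prompt ++ (contentOf im.2 ++ "\n")) ""

-- ===== PRECONDITION & SPEC =====
def Spec_message_to_prompt (messages : List (List (String × String))) (out : String) : Prop := out = message_to_prompt_alt messages
instance (messages : List (List (String × String))) (out : String) : Decidable (Spec_message_to_prompt messages out) := by unfold Spec_message_to_prompt; infer_instance

-- ===== CLAIM (what is proved, stated in full; the proofs are below) =====
def Claim_equal_message_to_prompt : Prop := ∀ (messages : List (List (String × String))), Dom_message_to_prompt messages → Spec_message_to_prompt messages (message_to_prompt messages)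

-- ===== LEMMAS AND PROOFS =====

-- two-at-a-time characterisation of the produced prompt
def pairsP : List (List (String × String)) → String
  | [] => ""
  | [u] => "USER: " ++ contentOf u ++ " ASSISTANT:"
  | u :: a :: rest => "USER: " ++ contentOf u ++ " ASSISTANT:" ++ contentOf a ++ "\n" ++ pairsP rest

theorem bfold (xs : List (List (String × String))) (acc : String) (n : Int) (hn : n % 2 = 0) :
    (PySem.List.enumerate xs n).foldl
      (fun prompt im =>
        if im.1 % 2 == 0 then prompt ++ ("USER: " ++ contentOf im.2 ++ " ASSISTANT:")
        else prompt ++ (contentOf im.2 ++ "\n")) acc = acc ++ pairsP xs := by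
  induction xs using pairsP.induct generalizing acc n with
  | case1 =>
      simp [PySem.List.enumerate, pairsP]
  | case2 u =>
      simp [PySem.List.enumerate, pairsP, List.foldl, hn, String.append_assoc]
  | case3 u a rest ih =>
      have hb1 : (n % 2 == 0) = true := by simpa using hn
      have hb2 : ((n + 1) % 2 == 0) = false := by simp; omega
      simp only [PySem.List.enumerate_cons, List.foldl_cons, hb1, hb2, reduceIte]
      rw [ih _ (n + 1 + 1) (by omega)]
      simp [pairsP, String.append_assoc]

theorem afold (t : Nat) : ∀ (ms : List (List (String × String))) (acc : String),
    ms.length = 2 * t →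
    (List.range t).foldl
      (fun p k =>
        p ++ ("USER: " ++ contentOf (ms.getD (2 * k) []) ++ " ASSISTANT:" ++
          contentOf (ms.getD (2 * k + 1) []) ++ "\n")) acc = acc ++ pairsP ms := by
  induction t with
  | zero =>
      intro ms acc h
      have : ms = [] := List.length_eq_zero_iff.mp (by omega)
      subst this
      simp [pairsP]
  | succ t ih =>
      intro ms acc h
      match ms, h with
      | u :: a :: rest, h =>
        have hr : rest.length = 2 * t := by simp at h; omega
        rw [List.range_succ_eq_map, List.foldl_cons, List.foldl_map]
        have hfun :
            (fun (p : String) (k : Nat) =>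
              p ++ ("USER: " ++ contentOf ((u :: a :: rest).getD (2 * (k + 1)) []) ++ " ASSISTANT:" ++
                contentOf ((u :: a :: rest).getD (2 * (k + 1) + 1) []) ++ "\n"))
            = (fun (p : String) (k : Nat) =>
              p ++ ("USER: " ++ contentOf (rest.getD (2 * k) []) ++ " ASSISTANT:" ++
                contentOf (rest.getD (2 * k + 1) []) ++ "\n")) := by
          funext p k
          have e1 : 2 * (k + 1) = (2 * k + 1) + 1 := by omega
          rw [e1]
          simp
        rw [hfun]
        simp only [List.getD_cons_succ]
        rw [ih rest _ hr]
        simp [pairsP, String.append_assoc]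

theorem pyRange_two (t : Nat) :
    PySem.List.pyRange 0 (2 * (t : Int)) 2 = (List.range t).map (fun k => ((2 * k : Nat) : Int)) := by
  rw [PySem.List.pyRange_of_pos 0 (2 * (t : Int)) (by norm_num)]
  have hc : (if (0 : Int) < 2 * (t : Int) then ((2 * (t : Int) - 0 + 2 - 1) / 2).toNat else 0) = t := by
    split <;> omega
  rw [hc]
  apply List.map_congr_left
  intro k _
  push_cast
  ring

theorem pairsP_append_last (t : Nat) : ∀ (xs : List (List (String × String))) (u : List (String × String)),
    xs.length = 2 * t →
    pairsP (xs ++ [u]) = pairsP xs ++ ("USER: " ++ contentOf u ++ " ASSISTANT:") := by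
  induction t with
  | zero =>
      intro xs u h
      have : xs = [] := List.length_eq_zero_iff.mp (by omega)
      subst this
      simp [pairsP]
  | succ t ih =>
      intro xs u h
      match xs, h with
      | x :: y :: rest, h =>
        have hr : rest.length = 2 * t := by simp at h; omega
        simp only [List.cons_append, pairsP]
        rw [ih rest u hr]
        simp [String.append_assoc]

-- ===== VERDICT (by name: the statement is the Claim_ definition above) =====
theorem message_to_prompt_spec : Claim_equal_message_to_prompt := by
  intro messages _
  unfold Spec_message_to_prompt message_to_prompt message_to_prompt_alt
  rw [bfold messages "" 0 (by decide)]
  by_cases hodd : messages.length % 2 = 1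
  · have hne : messages ≠ [] := by
      intro h; subst h; simp at hodd
    have hlen : messages.dropLast.length = 2 * (messages.length / 2) := by
      simp [List.length_dropLast]; omega
    have hb : (messages.length % 2 == 1) = true := by simpa using hodd
    simp only [hb, reduceIte]
    rw [PySem.List.slice_to_neg_one, PySem.List.pyGetD_neg_one _ _ hne]
    have hmsg : messages.dropLast ++ [messages.getLast hne] = messages :=
      List.dropLast_concat_getLast hne
    conv_rhs => rw [← hmsg]
    rw [pairsP_append_last (messages.length / 2) _ _ hlen]
    have hA :
        (PySem.List.pyRange 0 (messages.dropLast.length : Int) 2).foldl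
          (fun p i =>
            p ++ ("USER: " ++ contentOf (PySem.List.pyGetD messages.dropLast i []) ++ " ASSISTANT:" ++
              contentOf (PySem.List.pyGetD messages.dropLast (i + 1) []) ++ "\n")) ""
        = "" ++ pairsP messages.dropLast := by
      have hcast : (messages.dropLast.length : Int) = 2 * ((messages.length / 2 : Nat) : Int) := by
        exact_mod_cast hlen
      rw [hcast, pyRange_two, List.foldl_map]
      rw [show (fun (p : String) (k : Nat) =>
            p ++ ("USER: " ++ contentOf (PySem.List.pyGetD messages.dropLast ((2 * k : Nat) : Int) []) ++ " ASSISTANT:" ++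
              contentOf (PySem.List.pyGetD messages.dropLast (((2 * k : Nat) : Int) + 1) []) ++ "\n"))
          = (fun (p : String) (k : Nat) =>
            p ++ ("USER: " ++ contentOf (messages.dropLast.getD (2 * k) []) ++ " ASSISTANT:" ++
              contentOf (messages.dropLast.getD (2 * k + 1) []) ++ "\n")) from by
        funext p k
        have : ((2 * k : Nat) : Int) + 1 = ((2 * k + 1 : Nat) : Int) := by push_cast; ring
        rw [this, PySem.List.pyGetD_natCast, PySem.List.pyGetD_natCast]]
      exact afold (messages.length / 2) messages.dropLast "" hlen
    rw [hA]
    simp [String.append_assoc]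
  · have hlen : messages.length = 2 * (messages.length / 2) := by omega
    have hb : (messages.length % 2 == 1) = false := by simp; omega
    simp only [hb, Bool.false_eq_true, if_false]
    have hcast : (messages.length : Int) = 2 * ((messages.length / 2 : Nat) : Int) := by
      exact_mod_cast hlen
    rw [hcast, pyRange_two, List.foldl_map]
    rw [show (fun (p : String) (k : Nat) =>
          p ++ ("USER: " ++ contentOf (PySem.List.pyGetD messages ((2 * k : Nat) : Int) []) ++ " ASSISTANT:" ++
            contentOf (PySem.List.pyGetD messages (((2 * k : Nat) : Int) + 1) []) ++ "\n"))
        = (fun (p : String) (k : Nat) =>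
          p ++ ("USER: " ++ contentOf (messages.getD (2 * k) []) ++ " ASSISTANT:" ++
            contentOf (messages.getD (2 * k + 1) []) ++ "\n")) from by
      funext p k
      have : ((2 * k : Nat) : Int) + 1 = ((2 * k + 1 : Nat) : Int) := by push_cast; ring
      rw [this, PySem.List.pyGetD_natCast, PySem.List.pyGetD_natCast]]
    exact afold (messages.length / 2) messages "" hlen
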